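-- pv_equiv track=rewrite | github.com/SidharthPati/Computer-Vision-and-Image-Processing-Projects | Edge Detection/edge_detection.py | flip_sobel
-- ===== SOURCE A (Python) =====
-- def flip_sobel(matrix):
--     """
--     returns list after rotating the 3*3 sobel filter horizontally and vertically
--     :param matrix: Sobel filter in either x or y direction
--     :return: Flipped Sobel Filter
--     """
--     for i in range(0, 3):
--         temp = matrix[i][0]
--         matrix[i][0] = matrix[i][2]
--         matrix[i][2] = temp
--     for j in range(0, 3):
--         temp = matrix[0][j]
--         matrix[0][j] = matrix[2][j]
--         matrix[2][j] = temp
--     return matrix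
-- ===== SOURCE B (Python) =====
-- def flip_sobel(matrix):
--     """
--     returns list after rotating the 3*3 sobel filter horizontally and vertically
--     (a horizontal plus vertical flip is a 180-degree rotation, so it suffices to
--     swap the four antipodal cell pairs in place; the center cell stays put)
--     """
--     for (i, j), (k, l) in (((0, 0), (2, 2)), ((0, 1), (2, 1)),
--                            ((0, 2), (2, 0)), ((1, 0), (1, 2))):
--         matrix[i][j], matrix[k][l] = matrix[k][l], matrix[i][j]
--     return matrix
-- ===== Notes on version B (the rewrite author's own statement) =====
-- stated objective: alternative
-- what changed: B replaces A's two sequential swap loops (column swap within each row, then element-wise swap of rows 0 and 2) by one pass that swaps the four antipodal cell pairs of the 180-degree rotation in place; Pre_ excludes inputs with fewer than 3 rows or a short row among the first three, on which A raises IndexError.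
import Mathlib
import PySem

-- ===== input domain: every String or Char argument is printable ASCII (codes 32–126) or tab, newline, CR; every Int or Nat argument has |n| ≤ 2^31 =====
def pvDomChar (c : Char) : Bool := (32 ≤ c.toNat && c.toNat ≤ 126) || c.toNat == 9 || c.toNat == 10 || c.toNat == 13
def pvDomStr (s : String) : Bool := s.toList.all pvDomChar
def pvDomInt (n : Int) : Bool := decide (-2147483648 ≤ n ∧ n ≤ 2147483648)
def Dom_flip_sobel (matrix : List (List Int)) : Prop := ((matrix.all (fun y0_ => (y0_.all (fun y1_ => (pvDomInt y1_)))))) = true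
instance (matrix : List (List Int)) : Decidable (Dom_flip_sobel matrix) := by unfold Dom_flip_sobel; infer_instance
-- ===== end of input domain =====

-- B performs the 180° rotation by one pass swapping the four antipodal cell pairs in place,
-- instead of A's two sequential swap loops; both mutate the argument identically on Pre_.

-- ===== PORT A =====
-- literal transliteration: two for-loops of element swaps, mutation modelled by pySetD
-- (total stand-in for pySet?; Pre_ guarantees every index is in range, so it is exact there)
def flipStepCols (m : List (List Int)) (i : Int) : List (List Int) :=
  let temp := PySem.List.pyGetD (PySem.List.pyGetD m i []) 0 0
  let m := PySem.List.pySetD m i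
    (PySem.List.pySetD (PySem.List.pyGetD m i []) 0
      (PySem.List.pyGetD (PySem.List.pyGetD m i []) 2 0))
  PySem.List.pySetD m i (PySem.List.pySetD (PySem.List.pyGetD m i []) 2 temp)

def flipStepRows (m : List (List Int)) (j : Int) : List (List Int) :=
  let temp := PySem.List.pyGetD (PySem.List.pyGetD m 0 []) j 0
  let m := PySem.List.pySetD m 0
    (PySem.List.pySetD (PySem.List.pyGetD m 0 []) j
      (PySem.List.pyGetD (PySem.List.pyGetD m 2 []) j 0))
  PySem.List.pySetD m 2 (PySem.List.pySetD (PySem.List.pyGetD m 2 []) j temp)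

def flip_sobel (matrix : List (List Int)) : List (List Int) :=
  (PySem.List.pyRange 0 3 1).foldl flipStepRows
    ((PySem.List.pyRange 0 3 1).foldl flipStepCols matrix)

-- ===== PORT B =====
-- one loop over the four antipodal index pairs; Python's tuple swap reads both cells,
-- then writes matrix[i][j] first and matrix[k][l] second (on the possibly updated rows)
def swapPair (m : List (List Int)) (p : (Int × Int) × (Int × Int)) : List (List Int) :=
  let i := p.1.1; let j := p.1.2; let k := p.2.1; let l := p.2.2
  let a := PySem.List.pyGetD (PySem.List.pyGetD m i []) j 0
  let b := PySem.List.pyGetD (PySem.List.pyGetD m k []) l 0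
  let m := PySem.List.pySetD m i (PySem.List.pySetD (PySem.List.pyGetD m i []) j b)
  PySem.List.pySetD m k (PySem.List.pySetD (PySem.List.pyGetD m k []) l a)

def flip_sobel_alt (matrix : List (List Int)) : List (List Int) :=
  [(((0 : Int), (0 : Int)), ((2 : Int), (2 : Int))), ((0, 1), (2, 1)),
   ((0, 2), (2, 0)), ((1, 0), (1, 2))].foldl swapPair matrix

-- ===== PRECONDITION & SPEC =====
-- Pre_: at least three rows and each of the first three rows has at least three entries —
-- exactly the indices both programs read/write; on anything smaller A raises IndexError.
def Pre_flip_sobel (matrix : List (List Int)) : Prop :=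
  3 ≤ matrix.length ∧ (matrix.take 3).all (fun r => 3 ≤ r.length) = true
instance (matrix : List (List Int)) : Decidable (Pre_flip_sobel matrix) := by
  unfold Pre_flip_sobel; infer_instance
def pvWitness_flip_sobel : List (List Int) := [[1, 0, -1], [2, 0, -2], [1, 0, -1]]
def Spec_flip_sobel (matrix : List (List Int)) (out : List (List Int)) : Prop := out = flip_sobel_alt matrix
instance (matrix : List (List Int)) (out : List (List Int)) : Decidable (Spec_flip_sobel matrix out) := by unfold Spec_flip_sobel; infer_instance

-- ===== CLAIM =====
def Claim_equal_flip_sobel : Prop := ∀ (matrix : List (List Int)), Dom_flip_sobel matrix → Pre_flip_sobel matrix → Spec_flip_sobel matrix (flip_sobel matrix)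

-- ===== LEMMAS AND PROOFS =====
-- micro-evaluation lemmas: pyGetD / pySetD at the literal indices 0,1,2 on cons cells
theorem gA0 {α : Type} [Inhabited α] (a : α) (l : List α) (d : α) :
    PySem.List.pyGetD (a :: l) 0 d = a := by simp [pysem]
theorem gA1 {α : Type} [Inhabited α] (a b : α) (l : List α) (d : α) :
    PySem.List.pyGetD (a :: b :: l) 1 d = b := by simp [pysem]
theorem gA2 {α : Type} [Inhabited α] (a b c : α) (l : List α) (d : α) :
    PySem.List.pyGetD (a :: b :: c :: l) 2 d = c := by simp [pysem]
theorem sA0 {α : Type} (a : α) (l : List α) (v : α) :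
    PySem.List.pySetD (a :: l) 0 v = v :: l := by simp [pysem]
theorem sA1 {α : Type} (a b : α) (l : List α) (v : α) :
    PySem.List.pySetD (a :: b :: l) 1 v = a :: v :: l := by simp [pysem]
theorem sA2 {α : Type} (a b c : α) (l : List α) (v : α) :
    PySem.List.pySetD (a :: b :: c :: l) 2 v = a :: b :: v :: l := by simp [pysem]

theorem stepCols0 (x y z : Int) (t : List Int) (ms : List (List Int)) :
    flipStepCols ((x :: y :: z :: t) :: ms) 0 = (z :: y :: x :: t) :: ms := by
  simp only [flipStepCols, gA0, gA2, sA0, sA2]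
theorem stepCols1 (r : List Int) (x y z : Int) (t : List Int) (ms : List (List Int)) :
    flipStepCols (r :: (x :: y :: z :: t) :: ms) 1 = r :: (z :: y :: x :: t) :: ms := by
  simp only [flipStepCols, gA0, gA1, gA2, sA0, sA1, sA2]
theorem stepCols2 (r s : List Int) (x y z : Int) (t : List Int) (ms : List (List Int)) :
    flipStepCols (r :: s :: (x :: y :: z :: t) :: ms) 2 = r :: s :: (z :: y :: x :: t) :: ms := by
  simp only [flipStepCols, gA0, gA2, sA0, sA2]
theorem stepRows0 (p0 p1 p2 : Int) (tp : List Int) (q : List Int) (r0 r1 r2 : Int)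
    (tr : List Int) (ms : List (List Int)) :
    flipStepRows ((p0 :: p1 :: p2 :: tp) :: q :: (r0 :: r1 :: r2 :: tr) :: ms) 0 =
      (r0 :: p1 :: p2 :: tp) :: q :: (p0 :: r1 :: r2 :: tr) :: ms := by
  simp only [flipStepRows, gA0, gA2, sA0, sA2]
theorem stepRows1 (p0 p1 p2 : Int) (tp : List Int) (q : List Int) (r0 r1 r2 : Int)
    (tr : List Int) (ms : List (List Int)) :
    flipStepRows ((p0 :: p1 :: p2 :: tp) :: q :: (r0 :: r1 :: r2 :: tr) :: ms) 1 =
      (p0 :: r1 :: p2 :: tp) :: q :: (r0 :: p1 :: r2 :: tr) :: ms := by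
  simp only [flipStepRows, gA0, gA1, gA2, sA0, sA1, sA2]
theorem stepRows2 (p0 p1 p2 : Int) (tp : List Int) (q : List Int) (r0 r1 r2 : Int)
    (tr : List Int) (ms : List (List Int)) :
    flipStepRows ((p0 :: p1 :: p2 :: tp) :: q :: (r0 :: r1 :: r2 :: tr) :: ms) 2 =
      (p0 :: p1 :: r2 :: tp) :: q :: (r0 :: r1 :: p2 :: tr) :: ms := by
  simp only [flipStepRows, gA0, gA2, sA0, sA2]

-- ===== VERDICT =====
theorem flip_sobel_spec : Claim_equal_flip_sobel := by
  intro matrix _ hpre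
  obtain ⟨hlen, hrows⟩ := hpre
  obtain ⟨r0, m1, rfl⟩ : ∃ a t, matrix = a :: t := by
    cases matrix with | nil => simp at hlen | cons a t => exact ⟨a, t, rfl⟩
  obtain ⟨r1, m2, rfl⟩ : ∃ a t, m1 = a :: t := by
    cases m1 with | nil => simp at hlen | cons a t => exact ⟨a, t, rfl⟩
  obtain ⟨r2, rest, rfl⟩ : ∃ a t, m2 = a :: t := by
    cases m2 with | nil => simp at hlen | cons a t => exact ⟨a, t, rfl⟩
  simp [List.all] at hrows
  obtain ⟨h0, h1, h2⟩ := hrows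
  obtain ⟨a0, a1, a2, ta, rfl⟩ : ∃ x y z t, r0 = x :: y :: z :: t := by
    match r0, h0 with | x :: y :: z :: t, _ => exact ⟨x, y, z, t, rfl⟩
  obtain ⟨b0, b1, b2, tb, rfl⟩ : ∃ x y z t, r1 = x :: y :: z :: t := by
    match r1, h1 with | x :: y :: z :: t, _ => exact ⟨x, y, z, t, rfl⟩
  obtain ⟨c0, c1, c2, tc, rfl⟩ : ∃ x y z t, r2 = x :: y :: z :: t := by
    match r2, h2 with | x :: y :: z :: t, _ => exact ⟨x, y, z, t, rfl⟩
  show flip_sobel _ = flip_sobel_alt _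
  have hr : PySem.List.pyRange 0 3 1 = [0, 1, 2] := by decide
  rw [flip_sobel, hr]
  simp only [List.foldl_cons, List.foldl_nil, stepCols0, stepCols1, stepCols2,
    stepRows0, stepRows1, stepRows2, flip_sobel_alt, swapPair, gA0, gA1, gA2,
    sA0, sA1, sA2]
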